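-- pv_equiv track=rewrite | github.com/Alusus/Alusus | Tools/build_src/parse_path_envvar.py | _tokenize_path_envvar_windows
-- ===== SOURCE A (Python) =====
-- def _tokenize_path_envvar_windows(path_envvar):
--     tokens = list()
--     i = 0
--     while i < len(path_envvar):
--         curr_char = path_envvar[i] if i < len(path_envvar) else None
--         if curr_char == ";":
--             tokens.append(curr_char)
--             i += 1
--         elif curr_char == "\"":
--             curr_token = ""
--             i += 1  # Skip the first double quote character.
--             curr_char = path_envvar[i] if i < len(path_envvar) else None
--             while curr_char != "\"" and i < len(path_envvar):
--                 curr_token += curr_char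
--                 i += 1
--                 curr_char = path_envvar[i] if i < len(path_envvar) else None
--             i += 1  # Skip the second double quote character.
--             curr_char = path_envvar[i] if i < len(path_envvar) else None
--             tokens.append(curr_token)
--         else:
--             curr_token = ""
--             while curr_char != ";" and i < len(path_envvar):
--                 curr_token += curr_char
--                 i += 1
--                 curr_char = path_envvar[i] if i < len(path_envvar) else None
--             tokens.append(curr_token)
--     return tokens
-- ===== SOURCE B (Python) =====
-- def _tokenize_path_envvar_windows(path_envvar):
--     # One-pass character state machine (no index arithmetic, no nested scans):
--     # state 0 = between tokens, 1 = inside plain token, 2 = inside quoted token.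
--     tokens = []
--     state = 0
--     buf = ""
--     for ch in path_envvar:
--         if state == 2:
--             if ch == '"':
--                 tokens.append(buf)
--                 buf = ""
--                 state = 0
--             else:
--                 buf += ch
--         elif state == 1:
--             if ch == ';':
--                 tokens.append(buf)
--                 tokens.append(';')
--                 buf = ""
--                 state = 0
--             else:
--                 buf += ch
--         else:
--             if ch == ';':
--                 tokens.append(';')
--             elif ch == '"':
--                 state = 2
--             else:
--                 state = 1
--                 buf = ch
--     if state != 0:
--         tokens.append(buf)
--     return tokens
-- ===== Notes on version B (the rewrite author's own statement) =====
-- stated objective: simpler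
-- what changed: Replaced the index-based while loop with nested inner scans and repeated bounds checks by a single forward pass over the characters driven by an explicit 3-state machine (between/plain/quoted) with a buffer, flushed once at the end.
import Mathlib
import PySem

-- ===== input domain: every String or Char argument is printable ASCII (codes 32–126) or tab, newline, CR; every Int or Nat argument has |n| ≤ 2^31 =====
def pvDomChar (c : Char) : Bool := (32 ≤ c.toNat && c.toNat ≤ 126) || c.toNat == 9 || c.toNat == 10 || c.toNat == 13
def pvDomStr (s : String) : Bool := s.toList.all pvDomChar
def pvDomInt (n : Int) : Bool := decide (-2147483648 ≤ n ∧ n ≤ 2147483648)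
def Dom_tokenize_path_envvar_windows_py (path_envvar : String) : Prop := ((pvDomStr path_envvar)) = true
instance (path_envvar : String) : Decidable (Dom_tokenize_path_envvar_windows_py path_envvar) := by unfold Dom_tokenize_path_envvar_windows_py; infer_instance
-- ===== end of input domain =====

-- B replaces A's index-based while loop with nested inner scans by a single foldl over the
-- characters with an explicit 3-state machine; objective: simpler (same O(n) cost).

-- ===== PORT A =====
-- inner while of the quoted branch: consume chars until '"' (the closing quote is dropped)
def pvScanQuote : List Char → List Char × List Char
  | [] => ([], [])
  | c :: rest =>
    if c = '"' then ([], rest)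
    else (c :: (pvScanQuote rest).1, (pvScanQuote rest).2)

-- inner while of the plain branch: consume chars until ';' (the ';' stays in the rest)
def pvScanPlain : List Char → List Char × List Char
  | [] => ([], [])
  | c :: rest =>
    if c = ';' then ([], c :: rest)
    else (c :: (pvScanPlain rest).1, (pvScanPlain rest).2)

theorem pvScanQuote_len (cs : List Char) : (pvScanQuote cs).2.length ≤ cs.length := by
  induction cs with
  | nil => simp [pvScanQuote]
  | cons c rest ih =>
    simp only [pvScanQuote]
    split
    · simp
    · simpa using Nat.le_succ_of_le ih

theorem pvScanPlain_len (cs : List Char) : (pvScanPlain cs).2.length ≤ cs.length := by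
  induction cs with
  | nil => simp [pvScanPlain]
  | cons c rest ih =>
    simp only [pvScanPlain]
    split
    · simp
    · simpa using Nat.le_succ_of_le ih

-- A's outer while loop, one step per appended token
def pvTokAuxA : List Char → List String
  | [] => []
  | c :: rest =>
    if c = ';' then ";" :: pvTokAuxA rest
    else if c = '"' then
      String.mk (pvScanQuote rest).1 :: pvTokAuxA (pvScanQuote rest).2
    else
      String.mk (c :: (pvScanPlain rest).1) :: pvTokAuxA (pvScanPlain rest).2
termination_by cs => cs.length
decreasing_by
  · simp
  · exact Nat.lt_succ_of_le (pvScanQuote_len rest)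
  · exact Nat.lt_succ_of_le (pvScanPlain_len rest)

def tokenize_path_envvar_windows_py (path_envvar : String) : List String :=
  pvTokAuxA path_envvar.toList

-- ===== PORT B =====
-- state: 0 = between tokens, 1 = plain token, 2 = quoted token; buf = current token
def pvStepB (acc : Nat × List Char × List String) (ch : Char) : Nat × List Char × List String :=
  let (st, buf, toks) := acc
  if st = 2 then
    if ch = '"' then (0, [], toks ++ [String.mk buf]) else (2, buf ++ [ch], toks)
  else if st = 1 then
    if ch = ';' then (0, [], toks ++ [String.mk buf, ";"]) else (1, buf ++ [ch], toks)
  else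
    if ch = ';' then (0, [], toks ++ [";"])
    else if ch = '"' then (2, [], toks)
    else (1, [ch], toks)

def tokenize_path_envvar_windows_py_alt (path_envvar : String) : List String :=
  let r := path_envvar.toList.foldl pvStepB (0, [], [])
  if r.1 = 0 then r.2.2 else r.2.2 ++ [String.mk r.2.1]

-- ===== PRECONDITION & SPEC =====
def Spec_tokenize_path_envvar_windows_py (path_envvar : String) (out : List String) : Prop := out = tokenize_path_envvar_windows_py_alt path_envvar
instance (path_envvar : String) (out : List String) : Decidable (Spec_tokenize_path_envvar_windows_py path_envvar out) := by unfold Spec_tokenize_path_envvar_windows_py; infer_instance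

-- ===== CLAIM (what is proved, stated in full; the proofs are below) =====
def Claim_equal_tokenize_path_envvar_windows_py : Prop := ∀ (path_envvar : String), Dom_tokenize_path_envvar_windows_py path_envvar → Spec_tokenize_path_envvar_windows_py path_envvar (tokenize_path_envvar_windows_py path_envvar)

-- ===== LEMMAS AND PROOFS =====

-- run B's fold from an arbitrary state and flush the buffer as Source B does at the end
def pvRunB (acc : Nat × List Char × List String) (cs : List Char) : List String :=
  let r := cs.foldl pvStepB acc
  if r.1 = 0 then r.2.2 else r.2.2 ++ [String.mk r.2.1]

theorem pvRunB_cons (acc : Nat × List Char × List String) (c : Char) (rest : List Char) :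
    pvRunB acc (c :: rest) = pvRunB (pvStepB acc c) rest := rfl

theorem pvRunB_quoted (cs : List Char) (buf : List Char) (toks : List String) :
    pvRunB (2, buf, toks) cs
      = pvRunB (0, [], toks ++ [String.mk (buf ++ (pvScanQuote cs).1)]) (pvScanQuote cs).2 := by
  induction cs generalizing buf toks with
  | nil => simp [pvRunB, pvScanQuote]
  | cons c rest ih =>
    rw [pvRunB_cons]
    by_cases h : c = '"'
    · have hstep : pvStepB (2, buf, toks) c = (0, [], toks ++ [String.mk buf]) := by
        simp [pvStepB, h]
      rw [hstep]
      simp [pvScanQuote, h]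
    · have hstep : pvStepB (2, buf, toks) c = (2, buf ++ [c], toks) := by
        simp [pvStepB, h]
      rw [hstep, ih]
      simp [pvScanQuote, h, List.append_assoc]

theorem pvRunB_plain (cs : List Char) (buf : List Char) (toks : List String) :
    pvRunB (1, buf, toks) cs
      = pvRunB (0, [], toks ++ [String.mk (buf ++ (pvScanPlain cs).1)]) (pvScanPlain cs).2 := by
  induction cs generalizing buf toks with
  | nil => simp [pvRunB, pvScanPlain]
  | cons c rest ih =>
    rw [pvRunB_cons]
    by_cases h : c = ';'
    · have hstep : pvStepB (1, buf, toks) c = (0, [], toks ++ [String.mk buf, ";"]) := by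
        simp [pvStepB, h]
      rw [hstep]
      simp [pvScanPlain, h, pvRunB_cons, pvStepB, List.append_assoc]
    · have hstep : pvStepB (1, buf, toks) c = (1, buf ++ [c], toks) := by
        simp [pvStepB, h]
      rw [hstep, ih]
      simp [pvScanPlain, h, List.append_assoc]

theorem pvRunB_zero : ∀ (n : Nat) (cs : List Char), cs.length ≤ n → ∀ (toks : List String),
    pvRunB (0, [], toks) cs = toks ++ pvTokAuxA cs := by
  intro n
  induction n with
  | zero =>
    intro cs h toks
    have : cs = [] := List.eq_nil_of_length_eq_zero (Nat.le_zero.mp h)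
    subst this
    simp [pvRunB, pvTokAuxA]
  | succ n ih =>
    intro cs h toks
    match cs with
    | [] => simp [pvRunB, pvTokAuxA]
    | c :: rest =>
      have hr : rest.length ≤ n := Nat.lt_succ_iff.mp h
      rw [pvRunB_cons]
      by_cases hs : c = ';'
      · have hstep : pvStepB (0, [], toks) c = (0, [], toks ++ [";"]) := by
          simp [pvStepB, hs]
        rw [hstep, ih rest hr, pvTokAuxA]
        simp [hs, List.append_assoc]
      · by_cases hq : c = '"'
        · have hstep : pvStepB (0, [], toks) c = (2, [], toks) := by
            simp [pvStepB, hs, hq]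
          rw [hstep, pvRunB_quoted,
            ih _ (Nat.le_trans (pvScanQuote_len rest) hr), pvTokAuxA]
          simp [hs, hq, List.append_assoc]
        · have hstep : pvStepB (0, [], toks) c = (1, [c], toks) := by
            simp [pvStepB, hs, hq]
          rw [hstep, pvRunB_plain,
            ih _ (Nat.le_trans (pvScanPlain_len rest) hr), pvTokAuxA]
          simp [hs, hq, List.append_assoc]

-- ===== VERDICT (by name: the statement is the Claim_ definition above) =====
theorem tokenize_path_envvar_windows_py_spec : Claim_equal_tokenize_path_envvar_windows_py := by
  intro s _
  unfold Spec_tokenize_path_envvar_windows_py tokenize_path_envvar_windows_py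
    tokenize_path_envvar_windows_py_alt
  have h := pvRunB_zero s.toList.length s.toList (Nat.le_refl _) []
  simp only [pvRunB, List.nil_append] at h
  exact h.symm
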